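-- pv_equiv track=rewrite | github.com/ursa-mikail/python-gaia | Libraries/data/data_structure/json_manager.py | extract_json_content_at_N_layer
-- ===== SOURCE A (Python) =====
-- def extract_json_content_at_N_layer(contents_serialized_json, layer_number_index):
--     length_of_contents = len(contents_serialized_json)
--
--     content_extracted = []
--
--     brace_start = '{'
--     brace_end = '}'
--     layer_count = -1  # layer_number_index is depth, starting from root which is 0
--
--     for i in range(0, length_of_contents):
--         if (contents_serialized_json[i] == brace_start):
--             layer_count = layer_count + 1
--
--         # starts recording
--         if (layer_count == layer_number_index):
--             content_extracted.append(contents_serialized_json[i])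
--         else:
--             pass
--
--         if (contents_serialized_json[i] == brace_end):
--             layer_count = layer_count - 1
--
--     # list to string
--     content_extracted = ''.join(content_extracted)
--     return content_extracted
-- ===== SOURCE B (Python) =====
-- def extract_json_content_at_N_layer(contents_serialized_json, layer_number_index):
--     # Pass 1: prefix tables.  opens[i] = number of '{' in the first i chars,
--     # closes[i] = number of '}' in the first i chars.
--     opens = [0]
--     closes = [0]
--     for ch in contents_serialized_json:
--         opens.append(opens[-1] + (ch == '{'))
--         closes.append(closes[-1] + (ch == '}'))
--     # Pass 2: a character at position i lies at depth opens[i+1] - closes[i] - 1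
--     # (opening braces count at their own index, closing braces take effect after).
--     return ''.join(ch for ch, o, c in zip(contents_serialized_json, opens[1:], closes)
--                    if o - c - 1 == layer_number_index)
-- ===== Notes on version B (the rewrite author's own statement) =====
-- stated objective: alternative
-- what changed: Replaced A's single stateful loop (running depth counter with interleaved record/decrement) by two prefix-count tables for '{' and '}' built in one pass, then a separate zip-filter pass selecting characters whose precomputed depth opens[i+1]-closes[i]-1 equals the requested layer.
import Mathlib
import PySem

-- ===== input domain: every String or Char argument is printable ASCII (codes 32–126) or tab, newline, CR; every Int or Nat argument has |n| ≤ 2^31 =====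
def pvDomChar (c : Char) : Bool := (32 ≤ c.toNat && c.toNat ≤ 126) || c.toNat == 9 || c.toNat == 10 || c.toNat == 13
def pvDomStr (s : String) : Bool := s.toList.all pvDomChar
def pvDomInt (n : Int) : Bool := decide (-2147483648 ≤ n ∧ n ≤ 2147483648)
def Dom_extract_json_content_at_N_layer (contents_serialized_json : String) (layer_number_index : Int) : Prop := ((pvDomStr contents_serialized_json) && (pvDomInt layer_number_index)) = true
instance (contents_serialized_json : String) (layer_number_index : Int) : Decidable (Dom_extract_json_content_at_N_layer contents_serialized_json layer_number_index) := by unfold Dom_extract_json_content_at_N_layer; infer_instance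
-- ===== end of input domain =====

-- B replaces A's single stateful depth-counter loop by two prefix-count tables plus a
-- separate filtering pass (objective: alternative decomposition; same O(n) cost).

-- ===== PORT A =====
-- literal port of A: one loop carrying (layer_count, content_extracted)
def extract_json_content_at_N_layer (contents_serialized_json : String) (layer_number_index : Int) : String :=
  let st :=
    contents_serialized_json.toList.foldl
      (fun (st : Int × List Char) c =>
        let lc := if c = '{' then st.1 + 1 else st.1
        let acc := if lc = layer_number_index then st.2 ++ [c] else st.2
        let lc' := if c = '}' then lc - 1 else lc
        (lc', acc))
      (-1, [])
  String.mk st.2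

-- ===== PORT B =====
-- literal port of Source B: pass 1 builds the opens/closes prefix tables (list appends),
-- pass 2 filters via zip(s, opens[1:], closes)
def extract_json_content_at_N_layer_alt (contents_serialized_json : String) (layer_number_index : Int) : String :=
  let cs := contents_serialized_json.toList
  let tabs :=
    cs.foldl
      (fun (st : List Int × List Int) c =>
        (st.1 ++ [st.1.getLast! + (if c = '{' then 1 else 0)],
         st.2 ++ [st.2.getLast! + (if c = '}' then 1 else 0)]))
      ([0], [0])
  let triples := cs.zip ((tabs.1.drop 1).zip tabs.2)
  String.mk (((triples.filter
      (fun t => t.2.1 - t.2.2 - 1 = layer_number_index)).map (fun t => t.1)))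

-- ===== PRECONDITION & SPEC =====
def Spec_extract_json_content_at_N_layer (contents_serialized_json : String) (layer_number_index : Int) (out : String) : Prop := out = extract_json_content_at_N_layer_alt contents_serialized_json layer_number_index
instance (contents_serialized_json : String) (layer_number_index : Int) (out : String) : Decidable (Spec_extract_json_content_at_N_layer contents_serialized_json layer_number_index out) := by unfold Spec_extract_json_content_at_N_layer; infer_instance

-- ===== CLAIM (what is proved, stated in full; the proofs are below) =====
def Claim_equal_extract_json_content_at_N_layer : Prop := ∀ (contents_serialized_json : String) (layer_number_index : Int), Dom_extract_json_content_at_N_layer contents_serialized_json layer_number_index → Spec_extract_json_content_at_N_layer contents_serialized_json layer_number_index (extract_json_content_at_N_layer contents_serialized_json layer_number_index)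

-- ===== LEMMAS AND PROOFS =====

-- reference selection: chars whose (post-'{') depth equals k, starting from depth d
def pvSel (k d : Int) : List Char → List Char
  | [] => []
  | c :: cs =>
    let d1 := if c = '{' then d + 1 else d
    let d2 := if c = '}' then d1 - 1 else d1
    (if d1 = k then [c] else []) ++ pvSel k d2 cs

-- prefix sums of g over a list, starting after accumulated value a
def pvPS (g : Char → Int) (a : Int) : List Char → List Int
  | [] => []
  | c :: cs => (a + g c) :: pvPS g (a + g c) cs

-- A's fold tail equals acc ++ pvSel
theorem pvA_fold (k : Int) (cs : List Char) : ∀ (d : Int) (acc : List Char),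
    (cs.foldl
      (fun (st : Int × List Char) c =>
        let lc := if c = '{' then st.1 + 1 else st.1
        let acc := if lc = k then st.2 ++ [c] else st.2
        let lc' := if c = '}' then lc - 1 else lc
        (lc', acc))
      (d, acc)).2 = acc ++ pvSel k d cs := by
  induction cs with
  | nil => intro d acc; simp [pvSel]
  | cons c cs ih =>
    intro d acc
    simp only [List.foldl_cons, pvSel]
    rw [ih]
    split_ifs <;> simp

-- B's pair fold builds the two prefix tables
theorem pvB_fold (cs : List Char) : ∀ (l1 l2 : List Int) (a b : Int),
    l1.getLast? = some a → l2.getLast? = some b →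
    cs.foldl
      (fun (st : List Int × List Int) c =>
        (st.1 ++ [st.1.getLast! + (if c = '{' then 1 else 0)],
         st.2 ++ [st.2.getLast! + (if c = '}' then 1 else 0)]))
      (l1, l2)
    = (l1 ++ pvPS (fun c => if c = '{' then 1 else 0) a cs,
       l2 ++ pvPS (fun c => if c = '}' then 1 else 0) b cs) := by
  induction cs with
  | nil => intro l1 l2 a b _ _; simp [pvPS]
  | cons c cs ih =>
    intro l1 l2 a b h1 h2
    have g1 : l1.getLast! = a := by
      simp [List.getLast!_eq_getLast?_getD, h1]
    have g2 : l2.getLast! = b := by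
      simp [List.getLast!_eq_getLast?_getD, h2]
    simp only [List.foldl_cons, g1, g2, pvPS]
    rw [ih (l1 ++ [a + (if c = '{' then 1 else 0)])
           (l2 ++ [b + (if c = '}' then 1 else 0)])
           (a + (if c = '{' then 1 else 0)) (b + (if c = '}' then 1 else 0))
           (by simp) (by simp)]
    simp

-- B's zip-filter-map over the prefix tables equals pvSel
theorem pvB_sel (k : Int) (cs : List Char) : ∀ (a b : Int),
    ((cs.zip ((pvPS (fun c => if c = '{' then 1 else 0) a cs).zip
              (b :: pvPS (fun c => if c = '}' then 1 else 0) b cs))).filter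
       (fun t => t.2.1 - t.2.2 - 1 = k)).map (fun t => t.1)
    = pvSel k (a - b - 1) cs := by
  induction cs with
  | nil => intro a b; simp [pvPS, pvSel]
  | cons c cs ih =>
    intro a b
    have harr : (a + (if c = '{' then 1 else 0)) - b - 1
        = (if c = '{' then (a - b - 1) + 1 else (a - b - 1)) := by
      by_cases h : c = '{' <;> simp [h] <;> ring
    have hd2 : (a + (if c = '{' then 1 else 0)) - (b + (if c = '}' then 1 else 0)) - 1
        = (if c = '}' then (if c = '{' then (a - b - 1) + 1 else (a - b - 1)) - 1
           else (if c = '{' then (a - b - 1) + 1 else (a - b - 1))) := by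
      by_cases h1 : c = '{' <;> by_cases h2 : c = '}' <;> simp [h1, h2] <;> ring
    simp only [pvPS, pvSel, List.zip_cons_cons, List.filter_cons]
    rw [← hd2, ← harr]
    by_cases hk : (a + (if c = '{' then 1 else 0)) - b - 1 = k <;> simp [hk, ih]

theorem pv_main (s : String) (k : Int) :
    extract_json_content_at_N_layer s k = extract_json_content_at_N_layer_alt s k := by
  unfold extract_json_content_at_N_layer extract_json_content_at_N_layer_alt
  simp only []
  rw [pvA_fold k s.toList (-1) []]
  rw [pvB_fold s.toList [0] [0] 0 0 (by simp) (by simp)]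
  simp only [List.nil_append, List.singleton_append, List.drop_succ_cons, List.drop_zero]
  rw [pvB_sel k s.toList 0 0]
  norm_num

-- ===== VERDICT (by name: the statement is the Claim_ definition above) =====
theorem extract_json_content_at_N_layer_spec : Claim_equal_extract_json_content_at_N_layer := by
  intro s k _
  unfold Spec_extract_json_content_at_N_layer
  exact pv_main s k
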